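-- pv_equiv track=rewrite | github.com/rysweet/AzureHayMaker | src/azure_haymaker/orchestrator/services/monitoring_service.py | _apply_resource_filters
-- ===== SOURCE A (Python) =====
-- from typing import Any
--
-- def _apply_resource_filters(
--
--     resources: list[dict[str, Any]],
--     scenario_name: str | None,
--     resource_type: str | None,
--     status: str | None,
-- ) -> list[dict[str, Any]]:
--     """
--     Apply filters to resources list.
--
--     Filters are applied in sequence. Each filter narrows down the results.
--
--     Args:
--         resources: List of all resources
--         scenario_name: Optional scenario filter
--         resource_type: Optional resource type filter
--         status: Optional status filter
--
--     Returns: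
--         Filtered resources list
--     """
--     filtered = resources
--
--     if scenario_name:
--         filtered = [r for r in filtered if r.get("scenario_name") == scenario_name]
--
--     if resource_type:
--         filtered = [r for r in filtered if r.get("resource_type") == resource_type]
--
--     if status:
--         filtered = [r for r in filtered if r.get("status") == status]
--
--     return filtered
-- ===== SOURCE B (Python) =====
-- from typing import Any
--
--
-- def _apply_resource_filters(
--     resources: list[dict[str, Any]],
--     scenario_name: str | None,
--     resource_type: str | None,
--     status: str | None,
-- ) -> list[dict[str, Any]]:
--     """Single-pass filter: assemble active (key, value) conditions, then filter once."""
--     conds = [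
--         (k, v)
--         for k, v in (
--             ("scenario_name", scenario_name),
--             ("resource_type", resource_type),
--             ("status", status),
--         )
--         if v
--     ]
--     if not conds:
--         return resources
--     return [r for r in resources if all(r.get(k) == v for k, v in conds)]
-- ===== Notes on version B (the rewrite author's own statement) =====
-- stated objective: alternative
-- what changed: B builds the list of active (key, expected-value) filter conditions once and filters the resources in a single pass with one combined predicate, instead of A's up to three sequential list-comprehension passes.
import Mathlib
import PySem

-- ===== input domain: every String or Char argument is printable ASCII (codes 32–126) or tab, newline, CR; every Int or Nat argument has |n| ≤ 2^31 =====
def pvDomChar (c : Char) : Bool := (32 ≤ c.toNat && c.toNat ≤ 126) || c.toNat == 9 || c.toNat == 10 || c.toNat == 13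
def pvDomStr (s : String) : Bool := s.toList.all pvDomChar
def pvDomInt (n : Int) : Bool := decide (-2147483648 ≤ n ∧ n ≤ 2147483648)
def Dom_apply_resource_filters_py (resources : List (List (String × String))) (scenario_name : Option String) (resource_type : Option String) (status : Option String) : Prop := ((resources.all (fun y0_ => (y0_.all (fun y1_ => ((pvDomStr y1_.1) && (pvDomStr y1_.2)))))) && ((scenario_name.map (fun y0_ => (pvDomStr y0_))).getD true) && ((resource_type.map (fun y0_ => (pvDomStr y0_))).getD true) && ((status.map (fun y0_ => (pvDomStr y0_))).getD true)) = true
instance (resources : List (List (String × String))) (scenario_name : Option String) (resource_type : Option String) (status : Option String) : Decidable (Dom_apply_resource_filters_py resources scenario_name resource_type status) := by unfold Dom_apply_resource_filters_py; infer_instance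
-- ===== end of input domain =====

-- B replaces A's up-to-three sequential filtering passes by one pass with a combined
-- predicate built from the active (key, value) conditions (objective: alternative).


-- ===== PORT A =====
-- dict.get on an association list (unique keys; lookup = first match).
def pvGet? (r : List (String × String)) (k : String) : Option String :=
  (r.find? (fun kv => kv.1 == k)).map (·.2)

-- Python truthiness of a `str | None` argument: some nonempty string.
def pvTruthy (o : Option String) : Bool :=
  match o with
  | none => false
  | some s => !(s = "")

def apply_resource_filters_py (resources : List (List (String × String))) (scenario_name : Option String) (resource_type : Option String) (status : Option String) : List (List (String × String)) :=
  let filtered := resources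
  let filtered :=
    if pvTruthy scenario_name then
      filtered.filter (fun r => pvGet? r "scenario_name" == scenario_name)
    else filtered
  let filtered :=
    if pvTruthy resource_type then
      filtered.filter (fun r => pvGet? r "resource_type" == resource_type)
    else filtered
  let filtered :=
    if pvTruthy status then
      filtered.filter (fun r => pvGet? r "status" == status)
    else filtered
  filtered

-- ===== PORT B =====
def pvConds (scenario_name : Option String) (resource_type : Option String) (status : Option String) : List (String × String) :=
  ([("scenario_name", scenario_name), ("resource_type", resource_type), ("status", status)] : List (String × Option String)).filterMap
    (fun kv => match kv.2 with
      | none => none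
      | some v => if v = "" then none else some (kv.1, v))

def apply_resource_filters_py_alt (resources : List (List (String × String))) (scenario_name : Option String) (resource_type : Option String) (status : Option String) : List (List (String × String)) :=
  let conds := pvConds scenario_name resource_type status
  if conds = [] then resources
  else resources.filter (fun r => conds.all (fun kv => pvGet? r kv.1 == some kv.2))

-- ===== PRECONDITION & SPEC =====
def Spec_apply_resource_filters_py (resources : List (List (String × String))) (scenario_name : Option String) (resource_type : Option String) (status : Option String) (out : List (List (String × String))) : Prop := out = apply_resource_filters_py_alt resources scenario_name resource_type status
instance (resources : List (List (String × String))) (scenario_name : Option String) (resource_type : Option String) (status : Option String) (out : List (List (String × String))) : Decidable (Spec_apply_resource_filters_py resources scenario_name resource_type status out) := by unfold Spec_apply_resource_filters_py; infer_instance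

-- ===== CLAIM (what is proved, stated in full; the proofs are below) =====
def Claim_equal_apply_resource_filters_py : Prop := ∀ (resources : List (List (String × String))) (scenario_name : Option String) (resource_type : Option String) (status : Option String), Dom_apply_resource_filters_py resources scenario_name resource_type status → Spec_apply_resource_filters_py resources scenario_name resource_type status (apply_resource_filters_py resources scenario_name resource_type status)

-- ===== LEMMAS AND PROOFS =====

-- Sequential filtering by a list of conditions (the shape of A's passes).
def pvSeq (cs : List (String × String)) (xs : List (List (String × String))) : List (List (String × String)) :=
  cs.foldl (fun acc kv => acc.filter (fun r => pvGet? r kv.1 == some kv.2)) xs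

lemma pvSeq_eq_filter_all (cs : List (String × String)) (xs : List (List (String × String))) :
    pvSeq cs xs = xs.filter (fun r => cs.all (fun kv => pvGet? r kv.1 == some kv.2)) := by
  induction cs generalizing xs with
  | nil => simp [pvSeq]
  | cons kv cs ih =>
      simp only [pvSeq, List.foldl_cons] at *
      rw [ih, List.filter_filter]
      simp [Bool.and_comm]

def pvCond (k : String) (o : Option String) : List (String × String) :=
  match o with
  | none => []
  | some v => if v = "" then [] else [(k, v)]

lemma pvConds_eq (sn rt st : Option String) :
    pvConds sn rt st = pvCond "scenario_name" sn ++ pvCond "resource_type" rt ++ pvCond "status" st := by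
  rcases sn with _ | s <;> rcases rt with _ | t <;> rcases st with _ | u <;>
    simp only [pvConds, pvCond, List.filterMap] <;> (try split_ifs) <;> simp

lemma pvSeq_append (a b : List (String × String)) (xs : List (List (String × String))) :
    pvSeq (a ++ b) xs = pvSeq b (pvSeq a xs) :=
  List.foldl_append

lemma pvStep (o : Option String) (k : String) (xs : List (List (String × String))) :
    (if pvTruthy o then xs.filter (fun r => pvGet? r k == o) else xs) = pvSeq (pvCond k o) xs := by
  rcases o with _ | v
  · simp [pvTruthy, pvCond, pvSeq]
  · by_cases hv : v = "" <;> simp [pvTruthy, pvCond, pvSeq, hv]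

lemma pvA_eq_seq (resources : List (List (String × String))) (scenario_name : Option String)
    (resource_type : Option String) (status : Option String) :
    apply_resource_filters_py resources scenario_name resource_type status
      = pvSeq (pvConds scenario_name resource_type status) resources := by
  simp only [apply_resource_filters_py]
  rw [pvConds_eq, pvSeq_append, pvSeq_append, pvStep scenario_name, pvStep resource_type,
    pvStep status]

-- ===== VERDICT (by name: the statement is the Claim_ definition above) =====
theorem apply_resource_filters_py_spec : Claim_equal_apply_resource_filters_py := by
  intro resources sn rt st _
  unfold Spec_apply_resource_filters_py apply_resource_filters_py_alt
  rw [pvA_eq_seq, pvSeq_eq_filter_all]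
  by_cases h : pvConds sn rt st = [] <;> simp [h]
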